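-- pv_equiv track=rewrite | github.com/HaidiChen/Coding | python/easy/duplicate_array2.py | fd2
-- ===== SOURCE A (Python) =====
-- def fd2(arr, k = 1):
--     for x in arr:
--         first = arr.index(x)
--         try:
--             second = arr.index(x, first + 1)
--             if (second - first) <= k:
--                 return True
--         except:
--             continue
--     else:
--         return False
-- ===== SOURCE B (Python) =====
-- def fd2(arr, k=1):
--     first = {}
--     for i, x in enumerate(arr):
--         if x in first:
--             if i - first[x] <= k:
--                 return True
--         else:
--             first[x] = i
--     return False
-- ===== Notes on version B (the rewrite author's own statement) =====
-- stated objective: faster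
-- what changed: B replaces A's per-element quadratic scanning with repeated arr.index calls by a single left-to-right pass keeping a dict of each value's first index and checking the gap at every later sighting.
import Mathlib
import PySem

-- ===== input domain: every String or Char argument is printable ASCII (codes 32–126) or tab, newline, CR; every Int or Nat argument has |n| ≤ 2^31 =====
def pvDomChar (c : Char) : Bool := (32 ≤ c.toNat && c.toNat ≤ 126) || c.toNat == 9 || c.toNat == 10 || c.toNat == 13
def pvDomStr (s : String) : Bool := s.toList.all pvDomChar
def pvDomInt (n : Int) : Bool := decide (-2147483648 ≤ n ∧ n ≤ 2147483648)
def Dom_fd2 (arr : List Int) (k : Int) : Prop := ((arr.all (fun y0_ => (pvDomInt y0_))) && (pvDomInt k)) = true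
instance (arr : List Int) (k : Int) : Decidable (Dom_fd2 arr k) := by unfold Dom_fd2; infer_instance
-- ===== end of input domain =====

-- B replaces A's quadratic repeated arr.index scans with one pass over enumerate(arr) and a dict of first indices (asymptotically faster).

-- ===== PORT A =====
-- arr.index(x, first+1) is ported exactly as index? over (arr.drop (first+1)) offset back by first+1
-- (same first match from position first+1; none = the ValueError the bare except catches).
def fd2LoopA (arr : List Int) (k : Int) : List Int → Bool
  | [] => false
  | x :: rest =>
    match PySem.List.index? arr x with
    | none => false        -- unreachable when x ∈ arr (arr.index(x) cannot raise there)
    | some first =>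
      match PySem.List.index? (arr.drop (first + 1)) x with
      | some off =>
        if ((first : Int) + 1 + (off : Int)) - (first : Int) ≤ k then true
        else fd2LoopA arr k rest
      | none => fd2LoopA arr k rest

def fd2 (arr : List Int) (k : Int) : Bool := fd2LoopA arr k arr

-- ===== PORT B =====
def fd2LoopB (k : Int) : List (Int × Int) → PySem.Dict Int Int → Bool
  | [], _ => false
  | (i, x) :: rest, first =>
    match first.get? x with
    | some f => if i - f ≤ k then true else fd2LoopB k rest first
    | none => fd2LoopB k rest (first.insert x i)

def fd2_alt (arr : List Int) (k : Int) : Bool :=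
  fd2LoopB k (PySem.List.enumerate arr 0) PySem.Dict.empty

-- ===== PRECONDITION & SPEC =====
def Spec_fd2 (arr : List Int) (k : Int) (out : Bool) : Prop := out = fd2_alt arr k
instance (arr : List Int) (k : Int) (out : Bool) : Decidable (Spec_fd2 arr k out) := by unfold Spec_fd2; infer_instance

-- ===== CLAIM (what is proved, stated in full; the proofs are below) =====
def Claim_equal_fd2 : Prop := ∀ (arr : List Int) (k : Int), Dom_fd2 arr k → Spec_fd2 arr k (fd2 arr k)

-- ===== LEMMAS AND PROOFS =====

-- A's per-element check: the first two occurrences of x in arr are at distance ≤ k.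
def chkP (arr : List Int) (k : Int) (x : Int) : Prop :=
  ∃ f off : Nat, PySem.List.index? arr x = some f ∧
    PySem.List.index? (arr.drop (f + 1)) x = some off ∧
    ((f : Int) + 1 + (off : Int)) - (f : Int) ≤ k

-- B's result: some position j sees a value whose first occurrence f is within k.
def specR (arr : List Int) (k : Int) : Prop :=
  ∃ (j f : Nat) (x : Int), arr[j]? = some x ∧ PySem.List.index? arr x = some f ∧
    f < j ∧ (j : Int) - (f : Int) ≤ k

lemma idx_min {xs : List Int} {v : Int} {s : Nat} (h : PySem.List.index? xs v = some s)
    {m : Nat} (hm : m < xs.length) (hvm : xs[m] = v) : s ≤ m := by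
  obtain ⟨hk, _, hmin⟩ := PySem.List.getElem_of_index?_eq_some h
  by_contra hlt
  exact hmin m (by omega) hvm

lemma idx_append_cons_self (pre rest : List Int) (x : Int) (hx : x ∉ pre) :
    PySem.List.index? (pre ++ x :: rest) x = some pre.length := by
  rw [PySem.List.index?_eq_some_iff]
  exact ⟨pre, rest, rfl, rfl, hx⟩

lemma idx_append_singleton_ne (pre : List Int) (x v : Int) (hvx : v ≠ x) :
    PySem.List.index? (pre ++ [x]) v = PySem.List.index? pre v := by
  by_cases hv : v ∈ pre
  · exact PySem.List.index?_append_of_mem _ hv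
  · rw [(PySem.List.index?_eq_none_iff pre v).mpr hv,
      (PySem.List.index?_eq_none_iff (pre ++ [x]) v).mpr (by simp [hv, hvx])]

lemma loopA_iff (arr : List Int) (k : Int) :
    ∀ l : List Int, (∀ x ∈ l, x ∈ arr) →
      (fd2LoopA arr k l = true ↔ ∃ x ∈ l, chkP arr k x) := by
  intro l
  induction l with
  | nil => simp [fd2LoopA]
  | cons x rest ih =>
    intro hmem
    have hx : x ∈ arr := hmem x (by simp)
    obtain ⟨f, hf⟩ := Option.isSome_iff_exists.mp ((PySem.List.index?_isSome_iff arr x).mpr hx)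
    have ihr := ih (fun y hy => hmem y (List.mem_cons_of_mem _ hy))
    simp only [fd2LoopA, hf]
    cases h2 : PySem.List.index? (arr.drop (f + 1)) x with
    | none =>
      rw [ihr]
      constructor
      · rintro ⟨y, hy, hcy⟩; exact ⟨y, List.mem_cons_of_mem _ hy, hcy⟩
      · rintro ⟨y, hy, hcy⟩
        rcases List.mem_cons.mp hy with rfl | hy'
        · obtain ⟨f', off, hf', hoff, _⟩ := hcy
          rw [hf] at hf'; cases hf'
          rw [h2] at hoff; cases hoff
        · exact ⟨y, hy', hcy⟩
    | some off =>
      by_cases hgap : ((f : Int) + 1 + (off : Int)) - (f : Int) ≤ k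
      · simp only [if_pos hgap]
        constructor
        · intro _; exact ⟨x, List.mem_cons_self, f, off, hf, h2, hgap⟩
        · intro _; trivial
      · simp only [if_neg hgap]
        rw [ihr]
        constructor
        · rintro ⟨y, hy, hcy⟩; exact ⟨y, List.mem_cons_of_mem _ hy, hcy⟩
        · rintro ⟨y, hy, hcy⟩
          rcases List.mem_cons.mp hy with rfl | hy'
          · obtain ⟨f', off', hf', hoff, hg⟩ := hcy
            rw [hf] at hf'; cases hf'
            rw [h2] at hoff; cases hoff
            exact absurd hg hgap
          · exact ⟨y, hy', hcy⟩

lemma fd2_iff (arr : List Int) (k : Int) : fd2 arr k = true ↔ ∃ x, chkP arr k x := by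
  unfold fd2
  rw [loopA_iff arr k arr (fun _ h => h)]
  constructor
  · rintro ⟨x, _, h⟩; exact ⟨x, h⟩
  · rintro ⟨x, h⟩
    have hx : x ∈ arr := by
      obtain ⟨f, _, hf, _⟩ := h
      exact (PySem.List.index?_isSome_iff arr x).mp (by rw [hf]; rfl)
    exact ⟨x, hx, h⟩

lemma chkP_iff_specR (arr : List Int) (k : Int) : (∃ x, chkP arr k x) ↔ specR arr k := by
  constructor
  · rintro ⟨x, f, off, hf, hoff, hgap⟩
    obtain ⟨hlt, hget, _⟩ := PySem.List.getElem_of_index?_eq_some hoff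
    have hlen : f + 1 + off < arr.length := by
      have := List.length_drop (l := arr) (i := f + 1)
      omega
    refine ⟨f + 1 + off, f, x, ?_, hf, by omega, by push_cast; omega⟩
    rw [List.getElem?_eq_getElem hlen]
    rw [List.getElem_drop] at hget
    simp only [hget]
  · rintro ⟨j, f, x, hj, hf, hfj, hgap⟩
    have hjlt : j < arr.length := (List.getElem?_eq_some_iff.mp hj).1
    have hxj : arr[j] = x := (List.getElem?_eq_some_iff.mp hj).2
    have hmem : x ∈ arr.drop (f + 1) := by
      have hd : (arr.drop (f + 1))[j - (f + 1)]'(by simp; omega) = x := by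
        rw [List.getElem_drop]
        have he : f + 1 + (j - (f + 1)) = j := by omega
        simp only [he, hxj]
      exact hd ▸ List.getElem_mem _
    obtain ⟨s, hs⟩ := Option.isSome_iff_exists.mp
      ((PySem.List.index?_isSome_iff (arr.drop (f + 1)) x).mpr hmem)
    have hsle : s ≤ j - (f + 1) := by
      apply idx_min hs (by simp; omega)
      rw [List.getElem_drop]
      have he : f + 1 + (j - (f + 1)) = j := by omega
      simp only [he, hxj]
    exact ⟨x, f, s, hf, hs, by omega⟩

lemma loopB_iff (k : Int) :
    ∀ (suf pre : List Int) (d : PySem.Dict Int Int),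
      (∀ v : Int, d.get? v = (PySem.List.index? pre v).map (fun n => (n : Int))) →
      (fd2LoopB k (PySem.List.enumerate suf (pre.length : Int)) d = true ↔
        ∃ (j f : Nat) (x : Int), suf[j]? = some x ∧
          PySem.List.index? (pre ++ suf) x = some f ∧
          f < pre.length + j ∧ ((pre.length : Int) + (j : Int)) - (f : Int) ≤ k) := by
  intro suf
  induction suf with
  | nil => intro pre d _; simp [PySem.List.enumerate_nil, fd2LoopB]
  | cons x rest ih =>
    intro pre d hinv
    rw [PySem.List.enumerate_cons]
    have hassoc : pre ++ x :: rest = (pre ++ [x]) ++ rest := by simp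
    cases hgx : d.get? x with
    | some fI =>
      obtain ⟨f0, hpx, rfl⟩ : ∃ f0 : Nat, PySem.List.index? pre x = some f0 ∧ fI = (f0 : Int) := by
        have hv := hinv x
        rw [hgx] at hv
        cases hpx : PySem.List.index? pre x with
        | none => rw [hpx] at hv; simp at hv
        | some f0 => rw [hpx] at hv; simp at hv; exact ⟨f0, rfl, hv⟩
      have hxpre : x ∈ pre := (PySem.List.index?_isSome_iff pre x).mp (by rw [hpx]; rfl)
      have hf0lt : f0 < pre.length := (PySem.List.getElem_of_index?_eq_some hpx).fst
      have hidxfull : PySem.List.index? (pre ++ x :: rest) x = some f0 := by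
        rw [PySem.List.index?_append_of_mem _ hxpre, hpx]
      simp only [fd2LoopB, hgx]
      by_cases hgap : (pre.length : Int) - (f0 : Int) ≤ k
      · rw [if_pos hgap]
        constructor
        · intro _
          exact ⟨0, f0, x, by simp, hidxfull, by omega, by push_cast; omega⟩
        · intro _; trivial
      · rw [if_neg hgap]
        have hinv' : ∀ v : Int, d.get? v =
            (PySem.List.index? (pre ++ [x]) v).map (fun n => (n : Int)) := by
          intro v
          by_cases hvx : v = x
          · subst hvx
            rw [PySem.List.index?_append_of_mem _ hxpre, hinv]
          · rw [idx_append_singleton_ne pre x v hvx, hinv]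
        have hlen1 : ((pre ++ [x]).length : Int) = (pre.length : Int) + 1 := by
          simp
        rw [← hlen1, ih (pre ++ [x]) d hinv']
        constructor
        · rintro ⟨j, f, y, hjy, hfy, hflt, hg⟩
          refine ⟨j + 1, f, y, by simpa using hjy, by rw [hassoc]; exact hfy, ?_, ?_⟩
          · simp only [List.length_append, List.length_cons, List.length_nil] at hflt; omega
          · push_cast [List.length_append, List.length_cons, List.length_nil] at hg ⊢; omega
        · rintro ⟨j, f, y, hjy, hfy, hflt, hg⟩
          cases j with
          | zero =>
            exfalso
            simp at hjy; subst hjy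
            rw [hidxfull] at hfy
            have hff : f = f0 := by injection hfy with h; omega
            subst hff
            apply hgap
            push_cast at hg; omega
          | succ j' =>
            refine ⟨j', f, y, by simpa using hjy, by rw [← hassoc]; exact hfy, ?_, ?_⟩
            · simp only [List.length_append, List.length_cons, List.length_nil]; omega
            · push_cast [List.length_append, List.length_cons, List.length_nil] at hg ⊢; omega
    | none =>
      have hxpre : x ∉ pre := by
        have hv := hinv x
        rw [hgx] at hv
        cases hpx : PySem.List.index? pre x with
        | none => exact (PySem.List.index?_eq_none_iff pre x).mp hpx
        | some f0 => rw [hpx] at hv; simp at hv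
      simp only [fd2LoopB, hgx]
      have hinv' : ∀ v : Int, (d.insert x (pre.length : Int)).get? v =
          (PySem.List.index? (pre ++ [x]) v).map (fun n => (n : Int)) := by
        intro v
        by_cases hvx : v = x
        · subst hvx
          rw [PySem.Dict.get?_insert_self,
            PySem.List.index?_append_singleton_self _ _ hxpre]
          simp
        · rw [PySem.Dict.get?_insert_of_ne _ _ hvx,
            idx_append_singleton_ne pre x v hvx, hinv]
      have hlen1 : ((pre ++ [x]).length : Int) = (pre.length : Int) + 1 := by
        simp
      rw [← hlen1, ih (pre ++ [x]) _ hinv']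
      have hidxfull : PySem.List.index? (pre ++ x :: rest) x = some pre.length :=
        idx_append_cons_self pre rest x hxpre
      constructor
      · rintro ⟨j, f, y, hjy, hfy, hflt, hg⟩
        refine ⟨j + 1, f, y, by simpa using hjy, by rw [hassoc]; exact hfy, ?_, ?_⟩
        · simp only [List.length_append, List.length_cons, List.length_nil] at hflt; omega
        · push_cast [List.length_append, List.length_cons, List.length_nil] at hg ⊢; omega
      · rintro ⟨j, f, y, hjy, hfy, hflt, hg⟩
        cases j with
        | zero =>
          exfalso
          simp at hjy; subst hjy
          rw [hidxfull] at hfy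
          have hff : f = pre.length := by injection hfy with h; omega
          omega
        | succ j' =>
          refine ⟨j', f, y, by simpa using hjy, by rw [← hassoc]; exact hfy, ?_, ?_⟩
          · simp only [List.length_append, List.length_cons, List.length_nil]; omega
          · push_cast [List.length_append, List.length_cons, List.length_nil] at hg ⊢; omega

lemma fd2_alt_iff (arr : List Int) (k : Int) : fd2_alt arr k = true ↔ specR arr k := by
  unfold fd2_alt
  have h0 : (0 : Int) = (([] : List Int).length : Int) := by simp
  rw [h0, loopB_iff k arr [] PySem.Dict.empty (by intro v; simp [PySem.Dict.get?_empty])]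
  unfold specR
  constructor
  · rintro ⟨j, f, x, h1, h2, h3, h4⟩
    exact ⟨j, f, x, by simpa using h1, by simpa using h2, by simpa using h3, by simpa using h4⟩
  · rintro ⟨j, f, x, h1, h2, h3, h4⟩
    exact ⟨j, f, x, by simpa using h1, by simpa using h2, by simpa using h3, by simpa using h4⟩

-- ===== VERDICT (by name: the statement is the Claim_ definition above) =====
theorem fd2_spec : Claim_equal_fd2 := by
  intro arr k _
  unfold Spec_fd2
  have h := (fd2_iff arr k).trans ((chkP_iff_specR arr k).trans (fd2_alt_iff arr k).symm)
  cases ha : fd2 arr k <;> cases hb : fd2_alt arr k <;> simp_all
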